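-- pv_equiv track=rewrite | github.com/sejongmin/Python_study | 백준/Silver/17615. 볼 모으기/볼 모으기.py | solution
-- ===== SOURCE A (Python) =====
-- def solution(N: int, balls: list) -> None:
--     flag_b, flag_r = False, False
--     cnt_r, cnt_b = 0, 0
--     for i in range(N):
--         if flag_b and balls[i] == 'R':
--             cnt_r += 1
--         if flag_r and balls[i] == 'B':
--             cnt_b += 1
--         if balls[i] == 'B':
--             flag_b = True
--         if balls[i] == 'R':
--             flag_r = True
--     answer = min(cnt_r, cnt_b)
--     flag_b, flag_r = False, False
--     cnt_r, cnt_b = 0, 0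
--     for i in range(N - 1, -1, -1):
--         if flag_b and balls[i] == 'R':
--             cnt_r += 1
--         if flag_r and balls[i] == 'B':
--             cnt_b += 1
--         if balls[i] == 'B':
--             flag_b = True
--         if balls[i] == 'R':
--             flag_r = True
--     answer = min(answer, min(cnt_r, cnt_b))
--     return answer
-- ===== SOURCE B (Python) =====
-- def solution(N: int, balls: list) -> None:
--     xs = balls[:N] if N >= 0 else []
--     total_r = xs.count('R')
--     total_b = xs.count('B')
--
--     def cost(seq, target, total):
--         # balls of colour `target` that must move when swept toward seq's front:
--         # all of them except those already before the first opposite-colour ball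
--         opp = 'B' if target == 'R' else 'R'
--         if opp in seq:
--             return total - seq[:seq.index(opp)].count(target)
--         return 0
--
--     rev = xs[::-1]
--     return min(cost(xs, 'R', total_r), cost(xs, 'B', total_b),
--                cost(rev, 'R', total_r), cost(rev, 'B', total_b))
-- ===== Notes on version B (the rewrite author's own statement) =====
-- stated objective: alternative
-- what changed: A runs two stateful flag-carrying loops over indices (forward and backward); B counts each colour once and derives the four sweep costs arithmetically from slice-counts around the first opposite-colour ball in xs and in its reverse.
import Mathlib
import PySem

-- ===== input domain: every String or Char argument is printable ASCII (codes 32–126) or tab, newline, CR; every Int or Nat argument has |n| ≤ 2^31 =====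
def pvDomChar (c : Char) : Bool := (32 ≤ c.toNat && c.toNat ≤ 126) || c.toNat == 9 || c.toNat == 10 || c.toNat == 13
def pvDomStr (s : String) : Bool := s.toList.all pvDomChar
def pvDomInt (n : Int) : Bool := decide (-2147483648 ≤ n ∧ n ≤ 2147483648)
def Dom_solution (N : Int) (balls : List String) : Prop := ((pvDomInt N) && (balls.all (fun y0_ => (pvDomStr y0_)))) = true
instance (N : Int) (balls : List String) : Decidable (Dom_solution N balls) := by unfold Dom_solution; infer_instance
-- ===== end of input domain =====

-- B replaces A's two flag-carrying index loops by counting over slices around the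
-- first opposite-colour ball (a different decomposition, same cost).

-- ===== PORT A =====
-- the body of both of A's loops, on the current ball (a string)
def stepE (st : Bool × Bool × Int × Int) (b : String) : Bool × Bool × Int × Int :=
  let fb := st.1; let fr := st.2.1; let cr := st.2.2.1; let cb := st.2.2.2
  let cr := if fb && (b == "R") then cr + 1 else cr
  let cb := if fr && (b == "B") then cb + 1 else cb
  let fb := if b == "B" then true else fb
  let fr := if b == "R" then true else fr
  (fb, fr, cr, cb)

def solution (N : Int) (balls : List String) : Int :=
  let s1 := (PySem.List.pyRange 0 N 1).foldl
    (fun st i => stepE st (PySem.List.pyGetD balls i "")) (false, false, 0, 0)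
  let answer := min s1.2.2.1 s1.2.2.2
  let s2 := (PySem.List.pyRange (N - 1) (-1) (-1)).foldl
    (fun st i => stepE st (PySem.List.pyGetD balls i "")) (false, false, 0, 0)
  min answer (min s2.2.2.1 s2.2.2.2)

-- ===== PORT B =====
-- `if opp in seq: … seq.index(opp) …  else: return 0` ported as one match on index?
def costB (seq : List String) (target : String) (total : Int) : Int :=
  let opp := if target == "R" then "B" else "R"
  match PySem.List.index? seq opp with
  | some i => total - (PySem.List.count (PySem.List.slice seq none (some (i : Int))) target : Int)
  | none => 0

def solution_alt (N : Int) (balls : List String) : Int :=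
  let xs := if 0 ≤ N then PySem.List.slice balls none (some N) else []
  let totalR : Int := PySem.List.count xs "R"
  let totalB : Int := PySem.List.count xs "B"
  let rev := xs.reverse  -- xs[::-1]
  min (min (min (costB xs "R" totalR) (costB xs "B" totalB))
           (costB rev "R" totalR)) (costB rev "B" totalB)

-- ===== PRECONDITION & SPEC =====
-- Pre_ excludes exactly N > len(balls), where A raises IndexError.
def Pre_solution (N : Int) (balls : List String) : Prop := N ≤ (balls.length : Int)
instance (N : Int) (balls : List String) : Decidable (Pre_solution N balls) := by
  unfold Pre_solution; infer_instance

def pvWitness_solution : Int × List String := (4, ["R", "B", "R", "B"])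

def Spec_solution (N : Int) (balls : List String) (out : Int) : Prop := out = solution_alt N balls
instance (N : Int) (balls : List String) (out : Int) : Decidable (Spec_solution N balls out) := by
  unfold Spec_solution; infer_instance

-- ===== CLAIM (what is proved, stated in full; the proofs are below) =====
def Claim_equal_solution : Prop := ∀ (N : Int) (balls : List String),
  Dom_solution N balls → Pre_solution N balls → Spec_solution N balls (solution N balls)

-- ===== LEMMAS AND PROOFS =====

-- count of `tgt` strictly after the first occurrence of `opp` (0 if no `opp`)
def tailCnt (xs : List String) (opp tgt : String) : Int :=
  match xs with
  | [] => 0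
  | h :: t => if h == opp then (PySem.List.count t tgt : Int) else tailCnt t opp tgt

theorem foldl_stepE (xs : List String) (fb fr : Bool) (cr cb : Int) :
    xs.foldl stepE (fb, fr, cr, cb) =
      (fb || xs.contains "B", fr || xs.contains "R",
       cr + (if fb then (PySem.List.count xs "R" : Int) else tailCnt xs "B" "R"),
       cb + (if fr then (PySem.List.count xs "B" : Int) else tailCnt xs "R" "B")) := by
  induction xs generalizing fb fr cr cb with
  | nil => simp [tailCnt]
  | cons h t ih =>
    by_cases hB : h = "B"
    · subst hB
      simp only [List.foldl_cons, stepE, ih, List.contains_cons, tailCnt,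
        PySem.List.count_eq, List.count_cons]
      cases fb <;> cases fr <;> simp <;> ring
    · by_cases hR : h = "R"
      · subst hR
        simp only [List.foldl_cons, stepE, ih, List.contains_cons, tailCnt,
          PySem.List.count_eq, List.count_cons]
        cases fb <;> cases fr <;> simp <;> ring
      · simp only [List.foldl_cons, stepE, ih, List.contains_cons, tailCnt,
          PySem.List.count_eq, List.count_cons]
        cases fb <;> cases fr <;> simp [hB, hR, Ne.symm hB, Ne.symm hR]

theorem tailCnt_eq_costB_core (xs : List String) (opp tgt : String) (h : (opp == tgt) = false) :
    tailCnt xs opp tgt =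
      match PySem.List.index? xs opp with
      | some i => (PySem.List.count xs tgt : Int) - (PySem.List.count (xs.take i) tgt : Int)
      | none => 0 := by
  induction xs with
  | nil => simp [tailCnt, PySem.List.index?]
  | cons x t ih =>
    by_cases hx : x = opp
    · subst hx
      rw [PySem.List.index?_cons_self]
      have hne : (x == tgt) = false := h
      simp [tailCnt, PySem.List.count_eq, List.count_cons, hne]
    · rw [PySem.List.index?_cons_of_ne t hx]
      have htc : tailCnt (x :: t) opp tgt = tailCnt t opp tgt := by
        simp [tailCnt, hx]
      rw [htc, ih]
      cases hI : PySem.List.index? t opp with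
      | none => simp
      | some i =>
        simp only [Option.map_some, List.take_succ_cons,
          PySem.List.count_eq, List.count_cons]
        by_cases hxt : x = tgt <;> simp [hxt]

theorem costB_eq_tailCnt_R (seq : List String) :
    costB seq "R" (PySem.List.count seq "R") = tailCnt seq "B" "R" := by
  rw [tailCnt_eq_costB_core seq "B" "R" (by decide)]
  simp only [costB]
  cases hI : PySem.List.index? seq "B" with
  | none => rw [PySem.List.index?_eq_idxOf?] at hI; simp [hI]
  | some i =>
    rw [PySem.List.index?_eq_idxOf?] at hI
    simp [hI, PySem.List.slice_to_natCast]

theorem costB_eq_tailCnt_B (seq : List String) :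
    costB seq "B" (PySem.List.count seq "B") = tailCnt seq "R" "B" := by
  rw [tailCnt_eq_costB_core seq "R" "B" (by decide)]
  simp only [costB]
  cases hI : PySem.List.index? seq "R" with
  | none => rw [PySem.List.index?_eq_idxOf?] at hI; simp [hI]
  | some i =>
    rw [PySem.List.index?_eq_idxOf?] at hI
    simp [hI, PySem.List.slice_to_natCast]

-- ===== VERDICT (by name: the statement is the Claim_ definition above) =====
theorem solution_spec : Claim_equal_solution := by
  intro N balls _ hpre
  unfold Pre_solution at hpre
  unfold Spec_solution
  by_cases hN : 0 ≤ N
  · set xs := balls.take N.toNat with hxs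
    have hlen : xs.length = N.toNat := by rw [hxs, List.length_take]; omega
    have hlenI : (xs.length : Int) = N := by rw [hlen]; omega
    have hget : ∀ (i : Int), 0 ≤ i → i < N →
        PySem.List.pyGetD balls i "" = PySem.List.pyGetD xs i "" := by
      intro i h0 h1
      rw [PySem.List.pyGetD_eq_getElem balls "" h0 (by omega),
          PySem.List.pyGetD_eq_getElem xs "" h0 (by omega)]
      simp [hxs, List.getElem_take]
    have hfwd : (PySem.List.pyRange 0 N 1).foldl
        (fun st i => stepE st (PySem.List.pyGetD balls i "")) (false, false, 0, 0)
        = xs.foldl stepE (false, false, 0, 0) := by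
      rw [PySem.List.foldl_congr_mem _ _
          (fun st i => stepE st (PySem.List.pyGetD xs i "")) _ (by
        intro acc x hx
        obtain ⟨h1, h2⟩ := PySem.List.mem_pyRange_one.1 hx
        rw [hget x h1 h2])]
      rw [← hlenI]
      exact PySem.List.foldl_pyRange_zero_pyGetD' xs "" stepE _
    have hbwd : (PySem.List.pyRange (N - 1) (-1) (-1)).foldl
        (fun st i => stepE st (PySem.List.pyGetD balls i "")) (false, false, 0, 0)
        = xs.reverse.foldl stepE (false, false, 0, 0) := by
      have h1 : PySem.List.pyRange (N - 1) (-1) (-1) = (PySem.List.pyRange 0 N 1).reverse := by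
        rw [PySem.List.pyRange_neg_one_eq_reverse]; norm_num
      rw [h1]
      rw [PySem.List.foldl_congr_mem _ _
          (fun st i => stepE st (PySem.List.pyGetD xs i "")) _ (by
        intro acc x hx
        rw [List.mem_reverse] at hx
        obtain ⟨ha, hb⟩ := PySem.List.mem_pyRange_one.1 hx
        rw [hget x ha hb])]
      rw [← List.foldl_map (f := fun j => PySem.List.pyGetD xs j "") (g := stepE),
          List.map_reverse, ← hlenI, PySem.List.map_pyGetD_pyRange_zero']
    simp only [solution, solution_alt, hfwd, hbwd, if_pos hN,
      PySem.List.slice_to balls hN, ← hxs]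
    rw [foldl_stepE, foldl_stepE]
    have hcR : PySem.List.count xs "R" = PySem.List.count xs.reverse "R" := by
      simp [PySem.List.count_eq]
    have hcB : PySem.List.count xs "B" = PySem.List.count xs.reverse "B" := by
      simp [PySem.List.count_eq]
    rw [costB_eq_tailCnt_R xs, costB_eq_tailCnt_B xs, hcR, hcB,
      costB_eq_tailCnt_R xs.reverse, costB_eq_tailCnt_B xs.reverse]
    simp only [Bool.false_eq_true, if_false, zero_add]
    omega
  · 
    simp only [solution, solution_alt]
    rw [PySem.List.pyRange_one_eq_nil (by omega : N ≤ (0 : Int)),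
        PySem.List.pyRange_neg_one_eq_nil (by omega : N - 1 ≤ (-1 : Int)),
        if_neg (by omega : ¬ (0 : Int) ≤ N)]
    simp [costB, PySem.List.index?_eq_idxOf?]
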